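-- pv_equiv track=rewrite | github.com/Spinjala1/CSC-520-LABS-AND-HWs | L4/L4-template.py | L4
-- ===== SOURCE A (Python) =====
-- def L4(inString):
--     parts = inString.split()
--
--     positive_mod_count = 0
--     last_negative = None
--
--     for part in parts:
--         try:
--             num = int(part)
--
--             if num < 0:
--                 last_negative = num
--             elif num > 0 and num % 3 == 2:
--                 positive_mod_count += 1
--         except ValueError:
--             return 'no'  # Return 'no' if any part is not a valid integer
--
--     if last_negative is None:
--         return 'no'  # Return 'no' if there are no negative integers
--
--     # Check if count of positive integers equal to 2 mod 3 matches absolute value of last negative integer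
--     if positive_mod_count != abs(last_negative):
--         return 'no'
--
--     return 'yes'
-- ===== SOURCE B (Python) =====
-- def _one(part):
--     # classify a single token: None if not an int, else (count-contribution, negative-or-None)
--     try:
--         n = int(part)
--     except ValueError:
--         return None
--     if n < 0:
--         return (0, n)
--     if n > 0 and n % 3 == 2:
--         return (1, None)
--     return (0, None)
--
--
-- def _solve(parts):
--     # divide and conquer with an associative combine:
--     # (count1, neg1) * (count2, neg2) = (count1 + count2, neg2 if neg2 is not None else neg1)
--     if not parts:
--         return (0, None)
--     if len(parts) == 1:
--         return _one(parts[0])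
--     mid = len(parts) // 2
--     left = _solve(parts[:mid])
--     right = _solve(parts[mid:])
--     if left is None or right is None:
--         return None
--     return (left[0] + right[0], right[1] if right[1] is not None else left[1])
--
--
-- def L4(inString):
--     res = _solve(inString.split())
--     if res is None:
--         return 'no'
--     count, last_neg = res
--     if last_neg is None or count != abs(last_neg):
--         return 'no'
--     return 'yes'
-- ===== Notes on version B (the rewrite author's own statement) =====
-- stated objective: alternative
-- what changed: Replaces A's sequential loop with mutable state by a divide-and-conquer over the token list: each token is classified to a (count-contribution, negative-or-None) summary and halves are merged with an associative combine (sum the counts, right-biased choice of last negative).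
import Mathlib
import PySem

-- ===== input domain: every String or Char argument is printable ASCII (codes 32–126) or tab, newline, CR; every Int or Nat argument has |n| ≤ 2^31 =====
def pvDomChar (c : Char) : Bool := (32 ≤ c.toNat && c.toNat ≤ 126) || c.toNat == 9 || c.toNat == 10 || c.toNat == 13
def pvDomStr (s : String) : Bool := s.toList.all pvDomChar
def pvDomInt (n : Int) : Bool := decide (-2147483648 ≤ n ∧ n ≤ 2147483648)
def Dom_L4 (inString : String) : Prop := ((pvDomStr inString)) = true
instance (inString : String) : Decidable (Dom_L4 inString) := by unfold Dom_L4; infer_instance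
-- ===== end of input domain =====

-- B replaces A's sequential loop by a divide-and-conquer over the token list with an
-- associative combine (sum of counts, right-biased last negative); objective: alternative.

-- ===== PORT A =====
-- A's for-loop over parts with its two pieces of state (count, last_negative) and the
-- early 'no' return on a ValueError; the post-loop checks are the base case.
def L4Loop : List String → Int → Option Int → String
  | [], cnt, lastNeg =>
      match lastNeg with
      | none => "no"
      | some ln => if cnt ≠ |ln| then "no" else "yes"
  | p :: rest, cnt, lastNeg =>
      match PySem.Int.ofStr? p with
      | none => "no"
      | some num =>
          if num < 0 then L4Loop rest cnt (some num)
          else if 0 < num ∧ PySem.Int.mod num 3 = 2 then L4Loop rest (cnt + 1) lastNeg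
          else L4Loop rest cnt lastNeg

def L4 (inString : String) : String :=
  L4Loop (PySem.Str.split₀ inString) 0 none

-- ===== PORT B =====
-- '_one': classify one token (None = ValueError)
def pvOne (part : String) : Option (Int × Option Int) :=
  match PySem.Int.ofStr? part with
  | none => none
  | some n =>
      if n < 0 then some (0, some n)
      else if 0 < n ∧ PySem.Int.mod n 3 = 2 then some (1, none)
      else some (0, none)

-- the associative combine of '_solve'
def pvCombine : Option (Int × Option Int) → Option (Int × Option Int) → Option (Int × Option Int)
  | some (c1, n1), some (c2, n2) => some (c1 + c2, n2.or n1)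
  | _, _ => none

-- '_solve': divide and conquer over the token list
def pvSolve (parts : List String) : Option (Int × Option Int) :=
  match parts with
  | [] => some (0, none)
  | [p] => pvOne p
  | p :: q :: rest =>
      let mid := (p :: q :: rest).length / 2
      pvCombine (pvSolve ((p :: q :: rest).take mid)) (pvSolve ((p :: q :: rest).drop mid))
termination_by parts.length
decreasing_by
  · simp [List.length_take]; omega
  · simp; omega

def L4_alt (inString : String) : String :=
  match pvSolve (PySem.Str.split₀ inString) with
  | none => "no"
  | some (count, lastNeg) =>
      match lastNeg with
      | none => "no"
      | some ln => if count ≠ |ln| then "no" else "yes"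

-- ===== PRECONDITION & SPEC =====
def Spec_L4 (inString : String) (out : String) : Prop := out = L4_alt inString
instance (inString : String) (out : String) : Decidable (Spec_L4 inString out) := by unfold Spec_L4; infer_instance

-- ===== CLAIM (what is proved, stated in full; the proofs are below) =====
def Claim_equal_L4 : Prop := ∀ (inString : String), Dom_L4 inString → Spec_L4 inString (L4 inString)

-- ===== LEMMAS AND PROOFS =====

-- sequential reference: fold the per-token summaries left to right
def pvSeq : List String → Option (Int × Option Int)
  | [] => some (0, none)
  | p :: rest => pvCombine (pvOne p) (pvSeq rest)

theorem pvCombine_id_left (x : Option (Int × Option Int)) :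
    pvCombine (some (0, none)) x = x := by
  cases x with
  | none => rfl
  | some y => cases y with | mk c n => simp [pvCombine]

theorem pvSeq_append (l r : List String) :
    pvSeq (l ++ r) = pvCombine (pvSeq l) (pvSeq r) := by
  induction l with
  | nil => simp [pvSeq, pvCombine_id_left]
  | cons p rest ih =>
      simp only [List.cons_append, pvSeq, ih]
      cases pvOne p with
      | none => rfl
      | some a =>
        cases a with
        | mk c1 n1 =>
          cases pvSeq rest with
          | none => cases pvSeq r with
            | none => rfl
            | some b => cases b with | mk c n => rfl
          | some b =>
            cases b with
            | mk c2 n2 =>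
              cases pvSeq r with
              | none => rfl
              | some d =>
                cases d with
                | mk c3 n3 =>
                  simp [pvCombine, add_assoc, Option.or_assoc]

theorem pvCombine_id_right (x : Option (Int × Option Int)) :
    pvCombine x (some (0, none)) = x := by
  cases x with
  | none => rfl
  | some y => cases y with | mk c n => simp [pvCombine, Option.or]

theorem pvSolve_eq_seq (parts : List String) : pvSolve parts = pvSeq parts := by
  generalize hn : parts.length = n
  induction n using Nat.strong_induction_on generalizing parts with
  | _ n ih =>
    match parts, hn with
    | [], _ => simp [pvSolve, pvSeq]
    | [p], _ => simp [pvSolve, pvSeq, pvCombine_id_right]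
    | p :: q :: rest, hn =>
      rw [pvSolve]
      have h1 : ((p :: q :: rest).take ((p :: q :: rest).length / 2)).length < n := by
        rw [← hn]; simp [List.length_take]; omega
      have h2 : ((p :: q :: rest).drop ((p :: q :: rest).length / 2)).length < n := by
        rw [← hn]; simp; omega
      rw [ih _ h1 _ rfl, ih _ h2 _ rfl, ← pvSeq_append, List.take_append_drop]

-- A's loop, state generalized, computes the sequential combine of the summaries
def pvFinish (cnt : Int) (o : Option Int) : String :=
  match o with
  | none => "no"
  | some l => if cnt ≠ |l| then "no" else "yes"

theorem L4Loop_eq (parts : List String) (cnt : Int) (ln : Option Int) :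
    L4Loop parts cnt ln =
      match pvSeq parts with
      | none => "no"
      | some (c, o) => pvFinish (cnt + c) (o.or ln) := by
  induction parts generalizing cnt ln with
  | nil => simp [L4Loop, pvSeq, pvFinish]
  | cons p rest ih =>
    simp only [L4Loop, pvSeq, pvOne]
    cases hp : PySem.Int.ofStr? p with
    | none => rfl
    | some num =>
      dsimp only
      by_cases hneg : num < 0
      · simp only [if_pos hneg, ih]
        cases pvSeq rest with
        | none => rfl
        | some b =>
          cases b with
          | mk c o =>
            cases o <;> simp [pvCombine, pvFinish, Option.or]
      · by_cases hc : 0 < num ∧ PySem.Int.mod num 3 = 2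
        · simp only [if_neg hneg, if_pos hc, ih]
          cases pvSeq rest with
          | none => rfl
          | some b =>
            cases b with
            | mk c o => simp [pvCombine, pvFinish, add_assoc]
        · simp only [if_neg hneg, if_neg hc, ih]
          cases pvSeq rest with
          | none => rfl
          | some b =>
            cases b with
            | mk c o => simp [pvCombine]

-- ===== VERDICT (by name: the statement is the Claim_ definition above) =====
theorem L4_spec : Claim_equal_L4 := by
  intro s _
  show L4 s = L4_alt s
  unfold L4 L4_alt
  rw [L4Loop_eq, pvSolve_eq_seq]
  cases pvSeq (PySem.Str.split₀ s) with
  | none => rfl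
  | some b =>
    cases b with
    | mk c o => cases o <;> simp [pvFinish]
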